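-- pv_equiv track=rewrite | github.com/musicofhel/ShapeletForecasting | src/features/transition_matrix.py | _filter_sequences_by_condition
-- ===== SOURCE A (Python) =====
-- from typing import Dict, List, Tuple, Optional, Union
--
-- def _filter_sequences_by_condition(sequences: List[List[int]],
--                                  conditions: List[List[str]],
--                                  target_condition: str) -> List[List[int]]:
--     """Filter sequences based on market condition."""
--     filtered = []
--
--     for seq, cond in zip(sequences, conditions):
--         if len(seq) != len(cond):
--             continue
--
--         # Extract subsequences where condition matches
--         i = 0
--         while i < len(cond):
--             if cond[i] == target_condition:
--                 # Find continuous segment with target condition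
--                 j = i
--                 while j < len(cond) and cond[j] == target_condition:
--                     j += 1
--
--                 if j - i >= 2:  # Need at least 2 patterns for transition
--                     filtered.append(seq[i:j])
--
--                 i = j
--             else:
--                 i += 1
--
--     return filtered
-- ===== SOURCE B (Python) =====
-- from typing import List
--
-- def _filter_sequences_by_condition(sequences: List[List[int]],
--                                  conditions: List[List[str]],
--                                  target_condition: str) -> List[List[int]]:
--     """Filter sequences based on market condition (mask + edge detection)."""
--     filtered = []
--     for seq, cond in zip(sequences, conditions):
--         if len(seq) != len(cond):
--             continue
--         mask = [c == target_condition for c in cond]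
--         starts = [i for i, (prev, cur) in enumerate(zip([False] + mask, mask))
--                   if cur and not prev]
--         ends = [i + 1 for i, (cur, nxt) in enumerate(zip(mask, mask[1:] + [False]))
--                 if cur and not nxt]
--         filtered.extend(seq[s:e] for s, e in zip(starts, ends) if e - s >= 2)
--     return filtered
-- ===== Notes on version B (the rewrite author's own statement) =====
-- stated objective: alternative
-- what changed: Replaced A's two-pointer index scan (outer while locating a run start, inner while advancing to its end) by staged passes: build a boolean mask, derive run-start and run-end index lists by edge detection on the shifted mask, then pair them up and slice the runs of length >= 2.
import Mathlib
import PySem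

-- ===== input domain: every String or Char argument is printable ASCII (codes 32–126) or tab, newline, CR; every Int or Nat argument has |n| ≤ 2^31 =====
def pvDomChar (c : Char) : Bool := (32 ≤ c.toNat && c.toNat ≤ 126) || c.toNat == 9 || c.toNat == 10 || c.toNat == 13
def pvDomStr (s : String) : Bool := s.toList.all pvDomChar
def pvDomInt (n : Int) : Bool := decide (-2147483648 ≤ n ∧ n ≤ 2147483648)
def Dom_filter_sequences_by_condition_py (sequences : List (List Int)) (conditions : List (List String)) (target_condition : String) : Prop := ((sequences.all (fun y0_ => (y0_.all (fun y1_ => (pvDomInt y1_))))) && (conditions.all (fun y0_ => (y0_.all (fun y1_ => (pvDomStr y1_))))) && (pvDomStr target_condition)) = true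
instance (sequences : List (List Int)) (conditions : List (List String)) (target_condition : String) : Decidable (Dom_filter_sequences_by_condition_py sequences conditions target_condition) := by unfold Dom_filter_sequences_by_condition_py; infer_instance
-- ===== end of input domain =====

-- B replaces A's two-pointer index scan by staged passes: a boolean mask, run-start and
-- run-end index lists obtained by edge detection on the shifted mask, then pairing and
-- slicing (objective: alternative algorithm; same O(n) cost).

-- ===== PORT A =====
-- inner `while j < len(cond) and cond[j] == target: j += 1` of A (returns the final j);
-- the fuel argument only makes the loop structurally recursive and is always sufficient
def pvRunEnd (cond : List String) (t : String) : Nat → Nat → Nat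
  | 0, j => j
  | fuel + 1, j =>
      if j < cond.length then
        if cond.getD j "" == t then pvRunEnd cond t fuel (j + 1) else j
      else j

-- outer `while i < len(cond): …` of A, carrying the shared `filtered` accumulator
def pvScanA (seq : List Int) (cond : List String) (t : String) :
    Nat → Nat → List (List Int) → List (List Int)
  | 0, _, acc => acc
  | fuel + 1, i, acc =>
      if i < cond.length then
        if cond.getD i "" == t then
          pvScanA seq cond t fuel (pvRunEnd cond t (cond.length - i) i)
            (if 2 ≤ pvRunEnd cond t (cond.length - i) i - i then
               acc ++ [PySem.List.slice seq (some (i : Int))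
                         (some ((pvRunEnd cond t (cond.length - i) i : Nat) : Int))]
             else acc)
        else pvScanA seq cond t fuel (i + 1) acc
      else acc

def filter_sequences_by_condition_py (sequences : List (List Int)) (conditions : List (List String)) (target_condition : String) : List (List Int) :=
  (sequences.zip conditions).foldl
    (fun filtered p =>
      if p.1.length ≠ p.2.length then filtered
      else pvScanA p.1 p.2 target_condition (p.2.length + 1) 0 filtered) []

-- ===== PORT B =====
def filter_sequences_by_condition_py_alt (sequences : List (List Int)) (conditions : List (List String)) (target_condition : String) : List (List Int) :=
  (sequences.zip conditions).foldl
    (fun filtered p =>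
      if p.1.length ≠ p.2.length then filtered
      else
        let mask : List Bool := p.2.map (· == target_condition)
        let starts : List Nat := (((false :: mask).zip mask).zipIdx).filterMap
          (fun x => if x.1.2 && !x.1.1 then some x.2 else none)
        let ends : List Nat := ((mask.zip (mask.drop 1 ++ [false])).zipIdx).filterMap
          (fun x => if x.1.1 && !x.1.2 then some (x.2 + 1) else none)
        filtered ++ (starts.zip ends).filterMap
          (fun se => if 2 ≤ se.2 - se.1 then
              some (PySem.List.slice p.1 (some (se.1 : Int)) (some (se.2 : Int))) else none))
    []

-- ===== PRECONDITION & SPEC =====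
def Spec_filter_sequences_by_condition_py (sequences : List (List Int)) (conditions : List (List String)) (target_condition : String) (out : List (List Int)) : Prop := out = filter_sequences_by_condition_py_alt sequences conditions target_condition
instance (sequences : List (List Int)) (conditions : List (List String)) (target_condition : String) (out : List (List Int)) : Decidable (Spec_filter_sequences_by_condition_py sequences conditions target_condition out) := by unfold Spec_filter_sequences_by_condition_py; infer_instance

-- ===== CLAIM (what is proved, stated in full; the proofs are below) =====
def Claim_equal_filter_sequences_by_condition_py : Prop := ∀ (sequences : List (List Int)) (conditions : List (List String)) (target_condition : String), Dom_filter_sequences_by_condition_py sequences conditions target_condition → Spec_filter_sequences_by_condition_py sequences conditions target_condition (filter_sequences_by_condition_py sequences conditions target_condition)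

-- ===== LEMMAS AND PROOFS =====

-- common specification: the (start, end) pairs of the maximal true-runs of a mask
def pvMRuns : List Bool → Nat → List (Nat × Nat)
  | [], _ => []
  | b :: m, off =>
      if b then
        (off, off + 1 + (m.takeWhile (fun x => x)).length) ::
          pvMRuns (m.drop (m.takeWhile (fun x => x)).length)
                  (off + 1 + (m.takeWhile (fun x => x)).length)
      else pvMRuns m (off + 1)
termination_by m _ => m.length
decreasing_by
  · simp only [List.length_drop, List.length_cons]; omega
  · simp

def pvStartsF : Bool → Nat → List Bool → List Nat
  | _, _, [] => []
  | prev, off, b :: m => (if b && !prev then [off] else []) ++ pvStartsF b (off + 1) m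

def pvEndsF : Nat → List Bool → List Nat
  | _, [] => []
  | off, b :: m => (if b && !(m.headD false) then [off + 1] else []) ++ pvEndsF (off + 1) m

theorem pvStarts_eq (m : List Bool) : ∀ (prev : Bool) (n : Nat),
    (((prev :: m).zip m).zipIdx n).filterMap
      (fun x => if x.1.2 && !x.1.1 then some x.2 else none) = pvStartsF prev n m := by
  induction m with
  | nil => intro prev n; rfl
  | cons b m' ih =>
      intro prev n
      simp only [List.zip_cons_cons, List.zipIdx_cons, List.filterMap_cons, pvStartsF]
      rw [ih b (n + 1)]
      by_cases h : (b && !prev) = true <;> simp [h]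

theorem pvEnds_eq : ∀ (m : List Bool) (n : Nat),
    ((m.zip (m.drop 1 ++ [false])).zipIdx n).filterMap
      (fun x => if x.1.1 && !x.1.2 then some (x.2 + 1) else none) = pvEndsF n m := by
  intro m
  induction m with
  | nil => intro n; rfl
  | cons b m' ih =>
      intro n
      cases m' with
      | nil =>
          by_cases h : b = true <;> simp [h, pvEndsF]
      | cons c rest =>
          have hz : ((b :: c :: rest).zip ((b :: c :: rest).drop 1 ++ [false]))
              = (b, c) :: ((c :: rest).zip ((c :: rest).drop 1 ++ [false])) := rfl
          rw [hz]
          simp only [List.zipIdx_cons, List.filterMap_cons]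
          rw [ih (n + 1)]
          simp only [pvEndsF, List.headD_cons]
          by_cases h : (b && !c) = true <;> simp [h]

theorem pvStartsF_true : ∀ (m : List Bool) (off : Nat),
    pvStartsF true off m
      = pvStartsF false (off + (m.takeWhile (fun x => x)).length)
          (m.drop (m.takeWhile (fun x => x)).length) := by
  intro m
  induction m with
  | nil => intro off; simp [pvStartsF]
  | cons b m' ih =>
      intro off
      cases b with
      | true =>
          have h1 : pvStartsF true off (true :: m') = pvStartsF true (off + 1) m' := by
            simp [pvStartsF]
          have h2 : (true :: m').takeWhile (fun x => x) = true :: m'.takeWhile (fun x => x) := by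
            simp
          rw [h1, ih (off + 1), h2]
          simp only [List.length_cons, List.drop_succ_cons]
          congr 1
          omega
      | false =>
          have h2 : (false :: m').takeWhile (fun x => x) = [] := by
            simp
          rw [h2]
          simp [pvStartsF]

theorem pvEndsF_run : ∀ (m' : List Bool) (off : Nat),
    pvEndsF off (true :: m')
      = (off + 1 + (m'.takeWhile (fun x => x)).length) ::
          pvEndsF (off + 1 + (m'.takeWhile (fun x => x)).length)
            (m'.drop (m'.takeWhile (fun x => x)).length) := by
  intro m'
  induction m' with
  | nil => intro off; simp [pvEndsF]
  | cons c rest ih =>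
      intro off
      cases c with
      | true =>
          have h1 : pvEndsF off (true :: true :: rest) = pvEndsF (off + 1) (true :: rest) := by
            simp [pvEndsF]
          have h2 : (true :: rest).takeWhile (fun x => x) = true :: rest.takeWhile (fun x => x) := by
            simp
          rw [h1, ih (off + 1), h2]
          simp only [List.length_cons, List.drop_succ_cons]
          rw [show off + 1 + 1 + (rest.takeWhile (fun x => x)).length
              = off + 1 + ((rest.takeWhile (fun x => x)).length + 1) from by omega]
      | false =>
          have h2 : (false :: rest).takeWhile (fun x => x) = [] := by
            simp
          rw [h2]
          simp [pvEndsF]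

theorem pvZipSE : ∀ (m : List Bool) (off : Nat),
    (pvStartsF false off m).zip (pvEndsF off m) = pvMRuns m off := by
  intro m off
  match m with
  | [] => simp [pvMRuns, pvStartsF, pvEndsF]
  | false :: m' =>
      have hs : pvStartsF false off (false :: m') = pvStartsF false (off + 1) m' := by
        simp [pvStartsF]
      have he : pvEndsF off (false :: m') = pvEndsF (off + 1) m' := by
        simp [pvEndsF]
      rw [hs, he, pvZipSE m' (off + 1), pvMRuns]
      simp
  | true :: m' =>
      have hs : pvStartsF false off (true :: m')
          = off :: pvStartsF false (off + 1 + (m'.takeWhile (fun x => x)).length)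
              (m'.drop (m'.takeWhile (fun x => x)).length) := by
        have : pvStartsF false off (true :: m') = off :: pvStartsF true (off + 1) m' := by
          simp [pvStartsF]
        rw [this, pvStartsF_true]
      rw [hs, pvEndsF_run, List.zip_cons_cons,
        pvZipSE (m'.drop (m'.takeWhile (fun x => x)).length)
          (off + 1 + (m'.takeWhile (fun x => x)).length), pvMRuns]
      rfl
termination_by m _ => m.length
decreasing_by
  · simp
  · have := (List.takeWhile_sublist (fun x => x) (l := m')).length_le
    simp only [List.length_drop, List.length_cons]; omega

-- characterization of the run end found by A's inner while loop
theorem pvRunEnd_eq (cond : List String) (t : String) :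
    ∀ (fuel j : Nat), cond.length - j ≤ fuel →
      pvRunEnd cond t fuel j = j + ((cond.drop j).takeWhile (· == t)).length := by
  intro fuel
  induction fuel with
  | zero =>
      intro j hj
      have hlen : cond.length ≤ j := by omega
      rw [pvRunEnd]
      rw [List.drop_eq_nil_of_le hlen]
      simp
  | succ fuel ih =>
      intro j hj
      rw [pvRunEnd]
      by_cases h : j < cond.length
      · rw [if_pos h]
        have hdrop : cond.drop j = cond[j] :: cond.drop (j + 1) := List.drop_eq_getElem_cons h
        have hgetD : cond.getD j "" = cond[j] := List.getD_eq_getElem cond "" h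
        by_cases hm : (cond.getD j "" == t) = true
        · rw [if_pos hm, ih (j + 1) (by omega), hdrop]
          rw [hgetD] at hm
          rw [List.takeWhile_cons, if_pos hm]
          simp; omega
        · rw [if_neg hm, hdrop]
          rw [hgetD] at hm
          rw [List.takeWhile_cons, if_neg (by simp [hm])]
          simp
      · rw [if_neg h]
        have hlen : cond.length ≤ j := by omega
        rw [List.drop_eq_nil_of_le hlen]
        simp

-- A's outer scan computes the per-run slices of the mask's runs
theorem pvScanA_eq (seq : List Int) (cond : List String) (t : String) :
    ∀ (fuel i : Nat) (acc : List (List Int)), cond.length - i < fuel →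
      pvScanA seq cond t fuel i acc
        = acc ++ (pvMRuns ((cond.map (· == t)).drop i) i).filterMap
            (fun se => if 2 ≤ se.2 - se.1 then
                some (PySem.List.slice seq (some (se.1 : Int)) (some (se.2 : Int))) else none) := by
  intro fuel
  induction fuel with
  | zero => intro i acc h; omega
  | succ fuel ih =>
      intro i acc hfi
      rw [pvScanA]
      by_cases h : i < cond.length
      · rw [if_pos h]
        have hdropm : (cond.map (· == t)).drop i
            = (cond[i] == t) :: (cond.map (· == t)).drop (i + 1) := by
          have h1 : (cond.map (· == t)).drop i
              = (cond.map (· == t))[i]'(by simp; omega) :: (cond.map (· == t)).drop (i + 1) :=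
            List.drop_eq_getElem_cons (by simp; omega)
          simpa using h1
        have hgetD : cond.getD i "" = cond[i] := List.getD_eq_getElem cond "" h
        have hdropmap : (cond.map (· == t)).drop (i + 1) = (cond.drop (i + 1)).map (· == t) := by
          simp
        have hkm : (((cond.map (· == t)).drop (i + 1)).takeWhile (fun x => x)).length
            = ((cond.drop (i + 1)).takeWhile (· == t)).length := by
          rw [hdropmap, List.takeWhile_map]
          have hc : ((fun x => x) ∘ fun x : String => (x == t)) = (fun x : String => (x == t)) := rfl
          rw [hc]
          simp
        by_cases hm : (cond.getD i "" == t) = true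
        · rw [if_pos hm]
          have hb : (cond[i] == t) = true := by rw [hgetD] at hm; exact hm
          have hdropc : cond.drop i = cond[i] :: cond.drop (i + 1) := List.drop_eq_getElem_cons h
          have hre : pvRunEnd cond t (cond.length - i) i
              = i + 1 + ((cond.drop (i + 1)).takeWhile (· == t)).length := by
            rw [pvRunEnd_eq cond t (cond.length - i) i (by omega), hdropc,
              List.takeWhile_cons, if_pos hb]
            simp; omega
          have hkle : ((cond.drop (i + 1)).takeWhile (· == t)).length ≤ cond.length - (i + 1) := by
            have := (List.takeWhile_sublist (· == t) (l := cond.drop (i + 1))).length_le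
            simp at this
            omega
          have hruns : pvMRuns ((cond.map (· == t)).drop i) i
              = (i, i + 1 + ((cond.drop (i + 1)).takeWhile (· == t)).length) ::
                  pvMRuns ((cond.map (· == t)).drop
                      (i + 1 + ((cond.drop (i + 1)).takeWhile (· == t)).length))
                    (i + 1 + ((cond.drop (i + 1)).takeWhile (· == t)).length) := by
            rw [hdropm, pvMRuns, if_pos hb, hkm, List.drop_drop]
          rw [ih (pvRunEnd cond t (cond.length - i) i) _ (by rw [hre]; omega)]
          rw [hruns, List.filterMap_cons, hre]
          by_cases h2 : 2 ≤ i + 1 + ((cond.drop (i + 1)).takeWhile (· == t)).length - i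
          · rw [if_pos h2, if_pos h2]
            simp
          · rw [if_neg h2, if_neg h2]
        · rw [if_neg hm]
          have hb : (cond[i] == t) = false := by
            rw [hgetD] at hm
            simpa using hm
          rw [ih (i + 1) acc (by omega)]
          rw [hdropm, pvMRuns, if_neg (by simp [hb])]
      · rw [if_neg h]
        have hlen : cond.length ≤ i := by omega
        have hnil : (cond.map (· == t)).drop i = [] := List.drop_eq_nil_of_le (by simpa using hlen)
        rw [hnil, pvMRuns]
        simp

-- ===== VERDICT (by name: the statement is the Claim_ definition above) =====
theorem filter_sequences_by_condition_py_spec : Claim_equal_filter_sequences_by_condition_py := by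
  intro sequences conditions target_condition _
  unfold Spec_filter_sequences_by_condition_py
  unfold filter_sequences_by_condition_py filter_sequences_by_condition_py_alt
  induction (sequences.zip conditions) using List.reverseRecOn with
  | nil => rfl
  | append_singleton l p ih =>
      rw [List.foldl_append, List.foldl_append, ih]
      simp only [List.foldl_cons, List.foldl_nil]
      by_cases h : p.1.length ≠ p.2.length
      · rw [if_pos h, if_pos h]
      · rw [if_neg h, if_neg h]
        show pvScanA p.1 p.2 target_condition (p.2.length + 1) 0 _ = _
        rw [pvScanA_eq p.1 p.2 target_condition (p.2.length + 1) 0 _ (by omega)]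
        rw [List.drop_zero]
        rw [pvStarts_eq (p.2.map (· == target_condition)) false 0,
            pvEnds_eq (p.2.map (· == target_condition)) 0,
            pvZipSE (p.2.map (· == target_condition)) 0]
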